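-- pv_equiv track=rewrite | github.com/roman91DE/leetCode | dsa/python/maa.py | f
-- ===== SOURCE A (Python) =====
-- from typing import List
--
-- def f(xs: List[int]) -> List[List[int]]:
--     nums = sorted(xs)
--     distances: List[int] = [nums[i] - nums[i - 1] for i in range(1, len(nums))]
--     min_mad: int = min(distances)
--     pairs: List[List[int]] = []
--     for i, dist in enumerate(distances):
--         if dist == min_mad:
--             pairs.append(nums[i : i + 2])
--     return pairs
-- ===== SOURCE B (Python) =====
-- from typing import List
--
-- def f(xs: List[int]) -> List[List[int]]:
--     nums = sorted(xs)
--     if len(nums) < 2: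
--         return []
--     best = nums[1] - nums[0]
--     pairs = [[nums[0], nums[1]]]
--     for prev, cur in zip(nums[1:], nums[2:]):
--         d = cur - prev
--         if d < best:
--             best = d
--             pairs = [[prev, cur]]
--         elif d == best:
--             pairs.append([prev, cur])
--     return pairs
-- ===== Notes on version B (the rewrite author's own statement) =====
-- stated objective: alternative
-- what changed: B replaces A's three passes over the sorted list (build a distances list, take its min, then rescan with enumerate and slicing) by a single pass over adjacent pairs that maintains the running minimum and resets/extends the result list on the fly.
-- outside the precondition, e.g. on f([]): A raises ValueError, B returns []; on f([5]): A raises ValueError, B returns []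
-- crash fix: On inputs of length 0 or 1 A raises ValueError (min() of an empty sequence); B returns []. — e.g. on f([5]): A raises ValueError, B returns []
import Mathlib
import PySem

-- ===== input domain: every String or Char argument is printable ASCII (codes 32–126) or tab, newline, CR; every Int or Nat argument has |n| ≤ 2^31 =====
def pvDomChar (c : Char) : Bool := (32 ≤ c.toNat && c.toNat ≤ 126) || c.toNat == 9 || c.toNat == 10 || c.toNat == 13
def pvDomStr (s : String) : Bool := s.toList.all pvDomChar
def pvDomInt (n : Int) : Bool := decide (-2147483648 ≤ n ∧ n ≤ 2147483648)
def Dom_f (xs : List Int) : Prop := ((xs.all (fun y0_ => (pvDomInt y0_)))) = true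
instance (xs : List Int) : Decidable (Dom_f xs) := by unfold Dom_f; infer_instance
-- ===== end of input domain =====

-- B replaces A's three passes after sorting (distances list, min, rescan) by one pass
-- maintaining the running minimum and the result list; B returns [] where A raises.

-- ===== PORT A =====
def f (xs : List Int) : List (List Int) :=
  let nums := PySem.List.sorted xs (fun x => x) false
  let distances := (PySem.List.pyRange 1 (nums.length : Int) 1).map
    (fun i => PySem.List.pyGetD nums i 0 - PySem.List.pyGetD nums (i - 1) 0)
  match PySem.List.min? distances (fun d => d) with
  | none => []  -- Python: min([]) raises ValueError; excluded by Pre_f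
  | some min_mad =>
      (PySem.List.enumerate distances 0).foldl
        (fun pairs p =>
          if p.2 == min_mad then
            pairs ++ [PySem.List.slice nums (some p.1) (some (p.1 + 2))]
          else pairs) []

-- ===== PORT B =====
def loopB : Int → List (List Int) → List (Int × Int) → Int × List (List Int)
  | best, pairs, [] => (best, pairs)
  | best, pairs, (prev, cur) :: rest =>
      if cur - prev < best then loopB (cur - prev) [[prev, cur]] rest
      else if cur - prev = best then loopB best (pairs ++ [[prev, cur]]) rest
      else loopB best pairs rest

def f_alt (xs : List Int) : List (List Int) :=
  let nums := PySem.List.sorted xs (fun x => x) false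
  match nums with
  | a :: b :: rest => (loopB (b - a) [[a, b]] ((b :: rest).zip rest)).2
  | _ => []

-- ===== PRECONDITION & SPEC =====
-- A raises ValueError (min of the empty distances list) when len(xs) < 2; Pre_f excludes exactly those inputs.
def Pre_f (xs : List Int) : Prop := 2 ≤ xs.length
instance (xs : List Int) : Decidable (Pre_f xs) := by unfold Pre_f; infer_instance
def pvWitness_f : List Int := [3, 1, 2]

-- On inputs of length 0 or 1 A raises ValueError (min() of an empty sequence); B returns [].
def Raises_f (xs : List Int) : Prop := xs.length < 2
instance (xs : List Int) : Decidable (Raises_f xs) := by unfold Raises_f; infer_instance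
def pvRaiseWitness_f : List Int := [5]
def pvRaiseWitnessOut_f : List (List Int) := []

def Spec_f (xs : List Int) (out : List (List Int)) : Prop := out = f_alt xs
instance (xs : List Int) (out : List (List Int)) : Decidable (Spec_f xs out) := by unfold Spec_f; infer_instance

-- ===== CLAIM (what is proved, stated in full; the proofs are below) =====
def Claim_equal_f : Prop := ∀ (xs : List Int), Dom_f xs → Pre_f xs → Spec_f xs (f xs)
def Claim_raises_f : Prop := (∀ (xs : List Int), Dom_f xs → Raises_f xs → ¬ Pre_f xs) ∧ (Dom_f (pvRaiseWitness_f) ∧ Raises_f (pvRaiseWitness_f) ∧ f_alt (pvRaiseWitness_f) = pvRaiseWitnessOut_f)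

-- ===== LEMMAS AND PROOFS =====

theorem fmin_le (l : List Int) (b : Int) : l.foldl min b ≤ b := by
  induction l generalizing b with
  | nil => simp
  | cons d t ih => exact le_trans (ih (min b d)) (min_le_left _ _)

-- the single-pass loop of B computes min-filtered adjacent pairs
theorem loopB_spec (l : List (Int × Int)) (best : Int) (ps : List (List Int)) :
    (loopB best ps l).2 =
      (if (l.map (fun p => p.2 - p.1)).foldl min best = best then ps else []) ++
      (l.filter (fun p => p.2 - p.1 == (l.map (fun p => p.2 - p.1)).foldl min best)).map
        (fun p => [p.1, p.2]) := by
  induction l generalizing best ps with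
  | nil => simp [loopB]
  | cons q t ih =>
    obtain ⟨a, b⟩ := q
    have hle : ∀ (b0 : Int), (t.map (fun p => p.2 - p.1)).foldl min b0 ≤ b0 := fun b0 => fmin_le _ _
    by_cases h1 : b - a < best
    · rw [show loopB best ps ((a, b) :: t) = loopB (b - a) [[a, b]] t from by
        simp [loopB, h1]]
      rw [ih]
      have hmin : min best (b - a) = b - a := by omega
      simp only [List.map_cons, List.foldl_cons, hmin, List.filter_cons]
      have hne : ¬ (t.map (fun p => p.2 - p.1)).foldl min (b - a) = best := by
        have := hle (b - a); omega
      by_cases hM : (t.map (fun p => p.2 - p.1)).foldl min (b - a) = b - a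
      · simp [hM]
        intro h; exact absurd h (by omega)
      · have hM' : ¬ (b - a = (t.map (fun p => p.2 - p.1)).foldl min (b - a)) :=
          fun h => hM h.symm
        simp [hne, hM, hM']
    · by_cases h2 : b - a = best
      · rw [show loopB best ps ((a, b) :: t) = loopB best (ps ++ [[a, b]]) t from by
          simp [loopB, h2]]
        rw [ih]
        have hmin : min best (b - a) = best := by omega
        simp only [List.map_cons, List.foldl_cons, hmin, List.filter_cons]
        by_cases h3 : (t.map (fun p => p.2 - p.1)).foldl min best = best
        · have hb : (b - a = (t.map (fun p => p.2 - p.1)).foldl min best) := by omega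
          simp [h3, hb]
        · have hb : ¬ (b - a = (t.map (fun p => p.2 - p.1)).foldl min best) := by
            have := hle best; omega
          simp [h3, hb]
      · rw [show loopB best ps ((a, b) :: t) = loopB best ps t from by
          simp [loopB, h1, h2]]
        rw [ih]
        have hmin : min best (b - a) = best := by omega
        simp only [List.map_cons, List.foldl_cons, hmin, List.filter_cons]
        have hb : ¬ (b - a = (t.map (fun p => p.2 - p.1)).foldl min best) := by
          have := hle best; omega
        simp [hb]

-- A's distances list is the adjacent-differences of nums
theorem distances_eq (nums : List Int) :
    (PySem.List.pyRange 1 (nums.length : Int) 1).map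
      (fun i => PySem.List.pyGetD nums i 0 - PySem.List.pyGetD nums (i - 1) 0)
      = (nums.zip nums.tail).map (fun p => p.2 - p.1) := by
  apply List.ext_getElem
  · simp [PySem.List.length_pyRange_one, List.length_zip, List.length_tail]
  · intro k h1 h2
    simp only [List.getElem_map, PySem.List.getElem_pyRange_one, List.getElem_zip,
      List.getElem_tail]
    have hk : k + 1 < nums.length := by
      simp [PySem.List.length_pyRange_one] at h1; omega
    have e1 : (1 : Int) + k = ((k + 1 : Nat) : Int) := by push_cast; ring
    have e2 : (1 : Int) + k - 1 = ((k : Nat) : Int) := by ring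
    rw [e2, e1, PySem.List.pyGetD_natCast, PySem.List.pyGetD_natCast]
    simp [hk, Nat.lt_of_succ_lt hk]

-- a two-element slice nums[k : k+2]
theorem slice_two (nums : List Int) (k : Nat) (hk : k + 1 < nums.length) :
    PySem.List.slice nums (some (k : Int)) (some ((k : Int) + 2)) = [nums[k], nums[k + 1]] := by
  rw [show ((k : Int) + 2) = ((k + 2 : Nat) : Int) by push_cast; ring]
  rw [PySem.List.slice_toNat _ (by positivity) (by positivity)]
  simp only [Int.toNat_natCast]
  rw [show (k + 2) - k = 2 by omega]
  rw [List.drop_eq_getElem_cons (l := nums) (i := k) (by omega),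
      List.drop_eq_getElem_cons (l := nums) (i := k + 1) (by omega)]
  rfl

-- A's rescan over the enumerated distances, with its slices, is the value-filtered pair list
theorem sliceMap (nums : List Int) (m : Int) :
    ∀ (j k : Nat), nums.length - k = j →
    (((PySem.List.enumerate (((nums.drop k).zip (nums.drop (k + 1))).map
          (fun p => p.2 - p.1)) (k : Int)).filter (fun p => p.2 == m)).map
        (fun p => PySem.List.slice nums (some p.1) (some (p.1 + 2))))
    = (((nums.drop k).zip (nums.drop (k + 1))).filter
        (fun p => p.2 - p.1 == m)).map (fun p => [p.1, p.2]) := by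
  intro j
  induction j with
  | zero =>
    intro k hk
    have h : nums.drop (k + 1) = [] := List.drop_eq_nil_of_le (by omega)
    simp [h, PySem.List.enumerate_nil]
  | succ j ih =>
    intro k hk
    by_cases hlt : k + 1 < nums.length
    · rw [List.drop_eq_getElem_cons (l := nums) (i := k) (by omega),
        List.drop_eq_getElem_cons (l := nums) (i := k + 1) (by omega)]
      simp only [List.zip_cons_cons, List.map_cons, PySem.List.enumerate_cons, List.filter_cons]
      have hrec := ih (k + 1) (by omega)
      rw [List.drop_eq_getElem_cons (l := nums) (i := k + 1) (by omega)] at hrec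
      have hcast : (k : Int) + 1 = ((k + 1 : Nat) : Int) := by push_cast; ring
      by_cases hd : (nums[k + 1] - nums[k] == m) = true
      · simp only [hd, if_true, List.map_cons]
        rw [slice_two nums k hlt, hcast, hrec]
      · simp only [hd, if_false, Bool.false_eq_true]
        rw [hcast, hrec]
    · have h : nums.drop (k + 1) = [] := List.drop_eq_nil_of_le (by omega)
      simp [h, PySem.List.enumerate_nil]

-- ===== VERDICT (by name: the statement is the Claim_ definition above) =====
theorem f_spec : Claim_equal_f := by
  intro xs _ hpre
  unfold Spec_f f f_alt
  set nums := PySem.List.sorted xs (fun x => x) false with hnums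
  have hlen : nums.length = xs.length := PySem.List.length_sorted ..
  have h2 : 2 ≤ nums.length := by rw [hlen]; exact hpre
  match hm : nums with
  | [] => simp at h2
  | [a] => simp at h2
  | a :: b :: rest =>
    simp only
    rw [distances_eq]
    have hsplit : ((a :: b :: rest).zip (a :: b :: rest).tail)
        = (a, b) :: ((b :: rest).zip rest) := by simp
    rw [hsplit, List.map_cons, PySem.List.min?_id_cons]
    simp only
    rw [PySem.List.foldl_append_if, List.nil_append, loopB_spec]
    set t := (b :: rest).zip rest with ht
    set m := ((t.map (fun p => p.2 - p.1)).foldl min (b - a)) with hmdef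
    have hA := sliceMap (a :: b :: rest) m ((a :: b :: rest).length) 0 (by omega)
    simp only [show List.drop 0 (a :: b :: rest) = a :: b :: rest from rfl,
      show List.drop 1 (a :: b :: rest) = b :: rest from rfl,
      List.zip_cons_cons, List.map_cons, Nat.cast_zero, ← ht] at hA
    rw [hA, List.filter_cons]
    by_cases hMb : m = b - a
    · have hb : (b - a == m) = true := by simp [hMb]
      simp [hMb]
    · have hb : ¬ (b - a == m) = true := by simp; exact fun h => hMb h.symm
      simp [hb, hMb]

theorem f_raises : Claim_raises_f := by
  unfold Claim_raises_f
  exact ⟨fun xs _ hr hp => by unfold Raises_f at hr; unfold Pre_f at hp; omega, by decide⟩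

-- self-check: the crash-fix claim indeed yields B's value at the stated raise witness
theorem f_raises_witness_ok : f_alt pvRaiseWitness_f = pvRaiseWitnessOut_f := f_raises.2.2.2
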